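-- pv_equiv track=rewrite | github.com/codetesseractcode/-6Companies30days | 20_PhoneDirectory.py | displayContacts
-- ===== SOURCE A (Python) =====
-- def displayContacts(n, contact, s):
--     # Result will store list of lists for each prefix search
--     result = []
--
--     # For each prefix length from 1 to length of search string
--     for i in range(1, len(s) + 1):
--         prefix = s[:i]  # Get current prefix
--         temp = []  # Store matches for current prefix
--
--         # Search through all contacts
--         for name in contact:
--             # If contact starts with current prefix
--             if name.startswith(prefix):
--                 temp.append(name)
--
--         # If no matches found, append "0"
--         if not temp:
--             result.append(["0"])
--         else:
--             # Sort matches in lexicographical order and remove duplicates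
--             temp = sorted(list(set(temp)))
--             result.append(temp)
--
--     return result
-- ===== SOURCE B (Python) =====
-- def displayContacts(n, contact, s):
--     # Sort + dedup the contacts ONCE, then narrow the candidate list one
--     # character at a time: matches for prefix i+1 are a subset of matches for
--     # prefix i, and filtering a sorted duplicate-free list keeps it sorted and
--     # duplicate-free, so no per-prefix sort/set is needed.
--     cur = sorted(set(contact))
--     result = []
--     for i, c in enumerate(s):
--         cur = [name for name in cur if len(name) > i and name[i] == c]
--         result.append(cur if cur else ["0"])
--     return result
-- ===== Notes on version B (the rewrite author's own statement) =====
-- stated objective: faster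
-- what changed: B sorts+dedups the contact list once up front and then, for each successive character of s, filters the shrinking candidate list by that single character (matches for a longer prefix are a subset of matches for the shorter one, and filtering a sorted duplicate-free list keeps it sorted and duplicate-free), instead of A's per-prefix full scan of all contacts with startswith followed by a fresh set+sort.
import Mathlib
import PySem

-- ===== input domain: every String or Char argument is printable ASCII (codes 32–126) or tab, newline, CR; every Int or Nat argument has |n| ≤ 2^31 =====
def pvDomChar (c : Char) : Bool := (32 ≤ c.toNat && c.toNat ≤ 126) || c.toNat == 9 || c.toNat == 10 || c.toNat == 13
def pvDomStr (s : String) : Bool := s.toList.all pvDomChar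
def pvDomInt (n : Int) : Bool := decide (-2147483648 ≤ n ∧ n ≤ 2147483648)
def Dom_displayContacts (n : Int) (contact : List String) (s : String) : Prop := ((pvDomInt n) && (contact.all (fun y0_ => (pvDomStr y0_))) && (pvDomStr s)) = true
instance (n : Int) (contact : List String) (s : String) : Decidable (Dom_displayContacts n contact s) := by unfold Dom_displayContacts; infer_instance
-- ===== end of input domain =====

-- B sorts and deduplicates the contacts once and then narrows the candidate list one
-- character per prefix step, instead of A's per-prefix full rescan plus sort+dedup.

-- ===== PORT A =====
def displayContacts (n : Int) (contact : List String) (s : String) : List (List String) :=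
  (PySem.List.pyRange 1 (PySem.Str.len s + 1) 1).foldl (fun result i =>
    let pfx := PySem.Str.slice s none (some i)
    let temp := contact.foldl (fun temp name =>
      if PySem.Str.startswith name pfx then temp ++ [name] else temp) []
    if temp.isEmpty then result ++ [["0"]]
    else result ++ [PySem.List.sorted (PySem.Set.ofList temp) (fun x => x)]) []

-- ===== PORT B =====
def displayContacts_alt (n : Int) (contact : List String) (s : String) : List (List String) :=
  let cur0 : List String := PySem.List.sorted (PySem.Set.ofList contact) (fun x => x)
  ((PySem.List.enumerate s.toList).foldl
    (fun (st : List String × List (List String)) ic =>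
      let cur := st.1.filter (fun name =>
        decide (ic.1 < (name.toList.length : Int)) &&
        (PySem.List.pyGetD name.toList ic.1 ' ' == ic.2))
      (cur, st.2 ++ [if cur.isEmpty then ["0"] else cur]))
    (cur0, [])).2

-- ===== PRECONDITION & SPEC =====
def Spec_displayContacts (n : Int) (contact : List String) (s : String) (out : List (List String)) : Prop := out = displayContacts_alt n contact s
instance (n : Int) (contact : List String) (s : String) (out : List (List String)) : Decidable (Spec_displayContacts n contact s out) := by unfold Spec_displayContacts; infer_instance

-- ===== CLAIM (what is proved, stated in full; the proofs are below) =====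
def Claim_equal_displayContacts : Prop := ∀ (n : Int) (contact : List String) (s : String), Dom_displayContacts n contact s → Spec_displayContacts n contact s (displayContacts n contact s)

-- ===== LEMMAS AND PROOFS =====

-- The prefix predicate both ports filter by: name starts with the first k characters of s.
def pvP (sl : List Char) (k : Nat) (name : String) : Bool :=
  PySem.Chars.startswith name.toList (sl.take k)

-- The common per-prefix entry, phrased over the sorted deduplicated contact list.
def pvEntry (uniq : List String) (sl : List Char) (k : Nat) : List String :=
  if (uniq.filter (pvP sl k)).isEmpty then ["0"] else uniq.filter (pvP sl k)

lemma pv_uniq_nodup (contact : List String) :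
    (PySem.List.sorted (PySem.Set.ofList contact) (fun x => x)).Nodup :=
  (PySem.List.sorted_perm _ _ _).nodup_iff.mpr (PySem.Set.nodup_ofList contact)

-- L1: sorting the deduplicated filtered list = filtering the sorted deduplicated list.
lemma pv_sorted_filter (contact : List String) (p : String → Bool) :
    PySem.List.sorted (PySem.Set.ofList (contact.filter p)) (fun x => x) =
      (PySem.List.sorted (PySem.Set.ofList contact) (fun x => x)).filter p := by
  apply PySem.List.sorted_eq_of_perm_of_pairwise_lt
  · refine (List.perm_ext_iff_of_nodup ((pv_uniq_nodup contact).filter p)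
      (PySem.Set.nodup_ofList _)).mpr ?_
    intro a
    simp [PySem.Set.mem_ofList, PySem.List.mem_sorted, List.mem_filter]
  · exact (PySem.List.sorted_ofList_pairwise_lt contact).filter p

lemma pv_filter_isEmpty (contact : List String) (p : String → Bool) :
    (contact.filter p).isEmpty = ((PySem.List.sorted (PySem.Set.ofList contact) (fun x => x)).filter p).isEmpty := by
  rw [Bool.eq_iff_iff]
  simp only [List.isEmpty_iff, List.eq_nil_iff_forall_not_mem, List.mem_filter,
    PySem.List.mem_sorted, PySem.Set.mem_ofList]

-- L2: extending the prefix by one character = one per-character filter step.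
lemma pv_step_char (sl : List Char) (k : Nat) (hk : k < sl.length) (name : String) :
    pvP sl (k + 1) name =
      (pvP sl k name &&
        (decide ((k : Int) < (name.toList.length : Int)) &&
          (PySem.List.pyGetD name.toList (k : Int) ' ' == sl[k]))) := by
  rw [Bool.eq_iff_iff]
  simp only [pvP, PySem.Chars.startswith_iff, PySem.List.pyGetD_natCast, Bool.and_eq_true,
    decide_eq_true_eq, beq_iff_eq, Nat.cast_lt]
  constructor
  · intro h
    have hlen : k + 1 ≤ name.toList.length := by
      have := h.length_le
      simpa [List.length_take, Nat.min_eq_left (by omega : k + 1 ≤ sl.length)] using this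
    have hpre : sl.take k <+: sl.take (k+1) := by
      have : sl.take k = (sl.take (k+1)).take k := by
        rw [List.take_take]; simp
      rw [this]; exact List.take_prefix _ _
    refine ⟨hpre.trans h, by omega, ?_⟩
    have hg : (sl.take (k+1))[k]'(by simp [List.length_take]; omega) =
        name.toList[k]'(by omega) := h.getElem _
    simp [List.getElem_take] at hg
    rw [List.getD_eq_getElem _ _ (by omega), ← hg]
  · rintro ⟨h1, hlen, hget⟩
    have e1 : sl.take k = name.toList.take k := by
      have := (List.prefix_iff_eq_take).mp h1
      simpa [List.length_take, Nat.min_eq_left (by omega : k ≤ sl.length)] using this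
    have e2 : sl.take (k+1) = name.toList.take (k+1) := by
      rw [List.take_add_one, List.take_add_one, e1]
      congr 1
      rw [List.getElem?_eq_getElem hk, List.getElem?_eq_getElem hlen]
      simp [← hget, List.getElem?_eq_getElem hlen]
    rw [e2]; exact List.take_prefix _ _

lemma pvP_append (t : List Char) (c : Char) (k : Nat) (hk : k ≤ t.length) :
    pvP (t ++ [c]) k = pvP t k := by
  funext name; simp [pvP, List.take_append_of_le_length hk]

-- A's fold over range(1, k+1) produces the first k entries.
lemma pvA_fold (contact : List String) (s : String) (k : Nat) :
    (PySem.List.pyRange 1 ((k : Int) + 1) 1).foldl (fun result i =>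
      let pfx := PySem.Str.slice s none (some i)
      let temp := contact.foldl (fun temp name =>
        if PySem.Str.startswith name pfx then temp ++ [name] else temp) []
      if temp.isEmpty then result ++ [["0"]]
      else result ++ [PySem.List.sorted (PySem.Set.ofList temp) (fun x => x)]) [] =
    (List.range k).map (fun j =>
      pvEntry (PySem.List.sorted (PySem.Set.ofList contact) (fun x => x)) s.toList (j + 1)) := by
  induction k with
  | zero =>
    rw [show ((0 : Nat) : Int) + 1 = 1 by norm_num, PySem.List.pyRange_one_eq_nil le_rfl]
    simp
  | succ k ih =>
    rw [show (((k + 1 : Nat)) : Int) + 1 = ((k : Int) + 1) + 1 by push_cast; ring,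
      PySem.List.pyRange_one_succ_right (by omega), List.foldl_append, ih,
      List.range_succ, List.map_append]
    simp only [List.foldl_cons, List.foldl_nil]
    rw [PySem.List.foldl_append_if (fun name =>
        PySem.Str.startswith name (PySem.Str.slice s none (some ((k : Int) + 1)))) (fun x => x)]
    have hpfx : (fun name => PySem.Str.startswith name
        (PySem.Str.slice s none (some ((k : Int) + 1)))) = pvP s.toList (k + 1) := by
      funext name
      rw [PySem.Str.startswith_eq, pvP]
      congr 1
      rw [PySem.Str.toList_slice, PySem.Chars.slice_eq_listSlice,
        show ((k : Int) + 1) = (((k + 1 : Nat)) : Int) by push_cast; ring,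
        PySem.List.slice_to_natCast]
    rw [hpfx, List.nil_append, List.map_id_fun', id_def,
      pv_sorted_filter contact (pvP s.toList (k + 1)),
      pv_filter_isEmpty contact (pvP s.toList (k + 1))]
    unfold pvEntry
    simp only [List.map_cons, List.map_nil]
    split_ifs <;> rfl

-- B's fold over enumerate(s) ends with the narrowed candidate list and the same entries.
lemma pvB_fold (contact : List String) (sl : List Char) :
    (PySem.List.enumerate sl).foldl
      (fun (st : List String × List (List String)) ic =>
        let cur := st.1.filter (fun name =>
          decide (ic.1 < (name.toList.length : Int)) &&
          (PySem.List.pyGetD name.toList ic.1 ' ' == ic.2))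
        (cur, st.2 ++ [if cur.isEmpty then ["0"] else cur]))
      (PySem.List.sorted (PySem.Set.ofList contact) (fun x => x), []) =
    ((PySem.List.sorted (PySem.Set.ofList contact) (fun x => x)).filter (pvP sl sl.length),
     (List.range sl.length).map (fun j =>
       pvEntry (PySem.List.sorted (PySem.Set.ofList contact) (fun x => x)) sl (j + 1))) := by
  induction sl using List.reverseRecOn with
  | nil =>
    have h0 : (PySem.List.sorted (PySem.Set.ofList contact) (fun x => x)).filter (pvP [] 0) =
        PySem.List.sorted (PySem.Set.ofList contact) (fun x => x) :=
      List.filter_eq_self.mpr (by intro a _; simp [pvP, PySem.Chars.startswith_iff])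
    simp [h0]
  | append_singleton t c ih =>
    rw [PySem.List.enumerate_append, List.foldl_append, ih]
    simp only [PySem.List.enumerate_cons, PySem.List.enumerate_nil, List.foldl_cons,
      List.foldl_nil, zero_add, List.filter_filter]
    have hcond : ∀ name : String,
        ((decide ((t.length : Int) < (name.toList.length : Int)) &&
          (PySem.List.pyGetD name.toList (t.length : Int) ' ' == c)) &&
          pvP t t.length name) = pvP (t ++ [c]) (t.length + 1) name := by
      intro name
      rw [pv_step_char (t ++ [c]) t.length (by simp) name,
        pvP_append t c t.length le_rfl, Bool.and_comm,
        List.getElem_concat_length rfl]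
    have hfilt : ((PySem.List.sorted (PySem.Set.ofList contact) (fun x => x)).filter
        (fun name => (decide ((t.length : Int) < (name.toList.length : Int)) &&
          (PySem.List.pyGetD name.toList (t.length : Int) ' ' == c)) && pvP t t.length name)) =
        (PySem.List.sorted (PySem.Set.ofList contact) (fun x => x)).filter
          (pvP (t ++ [c]) (t.length + 1)) :=
      List.filter_congr (by intro a _; rw [hcond a])
    have hmap : ∀ j ∈ List.range t.length,
        pvEntry (PySem.List.sorted (PySem.Set.ofList contact) (fun x => x)) t (j + 1) =
        pvEntry (PySem.List.sorted (PySem.Set.ofList contact) (fun x => x)) (t ++ [c]) (j + 1) := by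
      intro j hj
      have : j + 1 ≤ t.length := List.mem_range.mp hj
      unfold pvEntry
      rw [pvP_append t c (j + 1) this]
    simp only [List.length_append, List.length_cons, List.length_nil, List.range_succ,
      List.map_append, List.map_cons, List.map_nil]
    rw [List.map_congr_left hmap]
    refine Prod.ext ?_ ?_
    · exact hfilt
    · simp only [hfilt]
      rfl

-- ===== VERDICT (by name: the statement is the Claim_ definition above) =====
theorem displayContacts_spec : Claim_equal_displayContacts := by
  intro n contact s _
  unfold Spec_displayContacts displayContacts displayContacts_alt
  dsimp only
  rw [PySem.Str.len_eq, pvA_fold contact s s.toList.length, pvB_fold contact s.toList]
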